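-- pv_equiv track=rewrite | github.com/Fnapo/03Corrupcion | ventanas/prepararInputs.py | quitarEspaciosCentrales
-- ===== SOURCE A (Python) =====
-- def quitarEspaciosCentrales(cadena: str) -> str:
--     lista = cadena.split()
--     cadena = ''
--     for item in lista:
--         if len(cadena) == 0:
--             cadena += item
--         else:
--             cadena += f" {item}"
--     # fin for
--
--     return cadena
-- ===== SOURCE B (Python) =====
-- def quitarEspaciosCentrales(cadena: str) -> str:
--     out = []
--     pending = False
--     for c in cadena:
--         if c.isspace():
--             pending = True
--         else:
--             if out and pending:
--                 out.append(' ')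
--             out.append(c)
--             pending = False
--     return ''.join(out)
-- ===== Notes on version B (the rewrite author's own statement) =====
-- stated objective: alternative
-- what changed: Replaces split-into-words-then-join with a single character-by-character scan that uses a pending-space flag to collapse whitespace runs and drop leading/trailing whitespace, building no intermediate word list.
import Mathlib
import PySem

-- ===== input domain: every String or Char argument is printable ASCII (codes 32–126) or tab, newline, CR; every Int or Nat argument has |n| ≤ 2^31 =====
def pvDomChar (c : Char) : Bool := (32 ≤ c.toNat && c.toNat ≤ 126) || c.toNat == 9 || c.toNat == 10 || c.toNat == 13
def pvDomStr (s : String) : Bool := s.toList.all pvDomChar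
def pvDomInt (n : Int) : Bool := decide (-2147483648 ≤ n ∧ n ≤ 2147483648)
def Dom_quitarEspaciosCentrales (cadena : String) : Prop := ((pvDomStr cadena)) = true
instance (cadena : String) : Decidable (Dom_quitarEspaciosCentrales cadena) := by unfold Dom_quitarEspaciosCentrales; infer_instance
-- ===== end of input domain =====

-- B replaces split-into-words-then-join with a single character scan using a pending-space flag
-- (alternative decomposition, same O(n) cost).

-- ===== PORT A =====
-- lista = cadena.split(); then accumulate: first word bare, later words with a leading space.
def quitarEspaciosCentrales (cadena : String) : String :=
  let lista := PySem.Str.split₀ cadena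
  lista.foldl
    (fun cad item => if PySem.Str.len cad = 0 then cad ++ item else cad ++ (" " ++ item))
    ""

-- ===== PORT B =====
-- one pass: whitespace sets a pending flag; a non-space char first emits one ' ' if output
-- is non-empty and a space is pending, then the char itself.
def pvAltGo : List Char → List Char → Bool → List Char
  | [], out, _ => out
  | c :: rest, out, pending =>
    if PySem.Chars.isspace c then
      pvAltGo rest out true
    else
      pvAltGo rest ((out ++ (if !out.isEmpty && pending then [' '] else [])) ++ [c]) false

def quitarEspaciosCentrales_alt (cadena : String) : String :=
  String.ofList (pvAltGo cadena.toList [] false)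

-- ===== PRECONDITION & SPEC =====
def Spec_quitarEspaciosCentrales (cadena : String) (out : String) : Prop := out = quitarEspaciosCentrales_alt cadena
instance (cadena : String) (out : String) : Decidable (Spec_quitarEspaciosCentrales cadena out) := by unfold Spec_quitarEspaciosCentrales; infer_instance

-- ===== CLAIM (what is proved, stated in full; the proofs are below) =====
def Claim_equal_quitarEspaciosCentrales : Prop := ∀ (cadena : String), Dom_quitarEspaciosCentrales cadena → Spec_quitarEspaciosCentrales cadena (quitarEspaciosCentrales cadena)

-- ===== LEMMAS AND PROOFS =====

/-- Words joined by single spaces: first word bare, each later word preceded by one ' '. -/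
def pvWjoin : List (List Char) → List Char
  | [] => []
  | w :: ws => w ++ ws.flatMap (fun v => ' ' :: v)

theorem pvWjoin_snoc (L : List (List Char)) (w : List Char) :
    pvWjoin (L ++ [w]) = pvWjoin L ++ (if L = [] then w else ' ' :: w) := by
  cases L with
  | nil => simp [pvWjoin]
  | cons v vs => simp [pvWjoin]

theorem pvWjoin_ne_nil (L : List (List Char)) (hL : L ≠ []) (hw : ∀ w ∈ L, w ≠ []) :
    pvWjoin L ≠ [] := by
  cases L with
  | nil => exact absurd rfl hL
  | cons v vs =>
    have hv : v ≠ [] := hw v (by simp)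
    simp [pvWjoin]
    intro h
    exact absurd h hv

/-- Every word produced by split₀.go is non-empty (given the accumulator contains only
    non-empty words). -/
theorem pvSplitGo_ne_nil : ∀ (s cur : List Char) (acc : List (List Char)),
    (∀ w ∈ acc, w ≠ []) →
    ∀ w ∈ PySem.Chars.split₀.go s cur acc, w ≠ []
  | [], cur, acc, hacc => by
    simp only [PySem.Chars.split₀.go]
    split
    · simpa using hacc
    · rename_i hcur
      intro w hw
      simp only [List.mem_reverse, List.mem_cons] at hw
      rcases hw with h | h
      · subst h
        simp only [List.isEmpty_iff] at hcur
        simpa using hcur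
      · exact hacc w h
  | c :: rest, cur, acc, hacc => by
    simp only [PySem.Chars.split₀.go]
    split
    · split
      · exact pvSplitGo_ne_nil rest [] acc hacc
      · rename_i hcur
        refine pvSplitGo_ne_nil rest [] (cur.reverse :: acc) ?_
        intro w hw
        simp only [List.mem_cons] at hw
        rcases hw with h | h
        · subst h
          simp only [List.isEmpty_iff] at hcur
          simpa using hcur
        · exact hacc w h
    · exact pvSplitGo_ne_nil rest (c :: cur) acc hacc

/-- Main invariant for B's scan: starting from the join of the words completed/in progress,
    the scan computes the join of all words split₀.go will produce. -/
theorem pvAltGo_spec : ∀ (s cur : List Char) (acc : List (List Char)) (pending : Bool),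
    (∀ w ∈ acc, w ≠ []) →
    (cur = [] → acc = [] ∨ pending = true) →
    (cur ≠ [] → pending = false) →
    pvAltGo s (pvWjoin ((if cur.isEmpty then acc else cur.reverse :: acc).reverse)) pending
      = pvWjoin (PySem.Chars.split₀.go s cur acc)
  | [], cur, acc, pending, hacc, h1, h2 => by
    simp only [PySem.Chars.split₀.go, pvAltGo]
    split <;> rename_i h <;> simp
  | c :: rest, cur, acc, pending, hacc, h1, h2 => by
    simp only [PySem.Chars.split₀.go, pvAltGo]
    by_cases hsp : PySem.Chars.isspace c = true
    · simp only [hsp, if_pos]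
      split
      · rename_i hcur
        have := pvAltGo_spec rest [] acc true hacc (fun _ => Or.inr rfl) (by simp)
        simpa [hcur] using this
      · rename_i hcur
        have hacc' : ∀ w ∈ cur.reverse :: acc, w ≠ [] := by
          intro w hw
          simp only [List.mem_cons] at hw
          rcases hw with h | h
          · subst h
            simp only [List.isEmpty_iff] at hcur
            simpa using hcur
          · exact hacc w h
        have := pvAltGo_spec rest [] (cur.reverse :: acc) true hacc' (fun _ => Or.inr rfl) (by simp)
        simpa [hcur] using this
    · simp only [hsp, if_neg, Bool.not_eq_true]
      have hnext := pvAltGo_spec rest (c :: cur) acc false hacc (by simp) (fun _ => rfl)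
      simp only [List.isEmpty_cons, if_neg, Bool.false_eq_true, not_false_iff] at hnext
      -- show the out argument equals the rendered state for (c :: cur, acc)
      have hout :
          (pvWjoin ((if cur.isEmpty then acc else cur.reverse :: acc).reverse)
              ++ (if !(pvWjoin ((if cur.isEmpty then acc else cur.reverse :: acc).reverse)).isEmpty
                      && pending then [' '] else [])) ++ [c]
            = pvWjoin (((c :: cur).reverse :: acc).reverse) := by
      -- case split on whether cur is empty, and whether acc is empty
        by_cases hcur : cur = []
        · subst hcur
          rcases h1 rfl with hA | hP
          · subst hA
            simp [pvWjoin]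
          · by_cases hA : acc = []
            · subst hA
              simp [pvWjoin]
            · have hne : pvWjoin acc.reverse ≠ [] := by
                refine pvWjoin_ne_nil _ (by simpa using hA) ?_
                intro w hw
                exact hacc w (by simpa using hw)
              simp only [List.isEmpty_nil, if_pos, List.reverse_cons, List.reverse_nil,
                List.nil_append, pvWjoin_snoc]
              have hAr : acc.reverse ≠ [] := by simpa using hA
              have hneb : (pvWjoin acc.reverse).isEmpty = false := by
                cases hh : pvWjoin acc.reverse with
                | nil => exact absurd hh hne
                | cons _ _ => rfl
              simp [hP, hAr, hneb]
        · have hP : pending = false := h2 hcur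
          have hcur' : cur.isEmpty = false := by
            cases cur with
            | nil => exact absurd rfl hcur
            | cons _ _ => rfl
          simp only [hcur', Bool.false_eq_true, if_neg, not_false_iff, List.reverse_cons,
            pvWjoin_snoc, hP, Bool.and_false, List.append_nil]
          by_cases hAr : acc.reverse = []
          · simp [hAr]
          · simp [hAr]
      rw [hout]
      exact hnext

/-- B computes the space-join of the split words. -/
theorem alt_eq_wjoin (s : List Char) :
    pvAltGo s [] false = pvWjoin (PySem.Chars.split₀ s) := by
  have := pvAltGo_spec s [] [] false (by simp) (fun _ => Or.inl rfl) (by simp)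
  simpa [pvWjoin, PySem.Chars.split₀] using this

/-- The list-level version of A's accumulation step. -/
def pvStepL (l : List Char) (w : List Char) : List Char :=
  if l.length = 0 then l ++ w else l ++ ' ' :: w

theorem foldA_toList (ws : List String) : ∀ (cad : String),
    (ws.foldl
        (fun cad item => if PySem.Str.len cad = 0 then cad ++ item else cad ++ (" " ++ item))
        cad).toList
      = (ws.map String.toList).foldl pvStepL cad.toList := by
  induction ws with
  | nil => intro cad; simp
  | cons w ws ih =>
    intro cad
    simp only [List.foldl_cons, List.map_cons]
    rw [ih]
    by_cases h : cad.toList = []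
    · have h0 : PySem.Str.len cad = 0 := by simp [PySem.Str.len_eq, h]
      simp [pvStepL, h]
    · have h0 : ¬ PySem.Str.len cad = 0 := by
        simp only [PySem.Str.len_eq, Nat.cast_eq_zero, List.length_eq_zero_iff]
        exact h
      have hsp : (" " : String).toList = [' '] := rfl
      have hc : cad ≠ "" := fun e => h (by rw [e]; rfl)
      simp [pvStepL, hsp, hc]

theorem foldL_ne (vs : List (List Char)) : ∀ (l : List Char), l ≠ [] →
    vs.foldl pvStepL l = l ++ vs.flatMap (fun v => ' ' :: v) := by
  induction vs with
  | nil => intro l _; simp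
  | cons v vs ih =>
    intro l hl
    have hlen : l.length ≠ 0 := by simpa using hl
    simp only [List.foldl_cons, pvStepL, hlen, if_neg, not_false_iff]
    rw [ih (l ++ ' ' :: v) (by simp)]
    simp

theorem foldL_nil (vs : List (List Char)) (hw : ∀ v ∈ vs, v ≠ []) :
    vs.foldl pvStepL [] = pvWjoin vs := by
  cases vs with
  | nil => simp [pvWjoin]
  | cons v vs =>
    have hv : v ≠ [] := hw v (by simp)
    simp only [List.foldl_cons, pvStepL, List.length_nil, if_pos, List.nil_append]
    rw [foldL_ne vs v hv]
    simp [pvWjoin]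

-- ===== VERDICT (by name: the statement is the Claim_ definition above) =====
theorem quitarEspaciosCentrales_spec : Claim_equal_quitarEspaciosCentrales := by
  intro cadena _
  unfold Spec_quitarEspaciosCentrales quitarEspaciosCentrales quitarEspaciosCentrales_alt
  have hwords : ∀ w ∈ PySem.Chars.split₀ cadena.toList, w ≠ [] := by
    intro w hw
    exact pvSplitGo_ne_nil cadena.toList [] [] (by simp) w hw
  have hnil : ("" : String).toList = [] := rfl
  have h := foldA_toList (PySem.Str.split₀ cadena) ""
  rw [PySem.Str.split₀_map_toList, hnil, foldL_nil _ hwords, ← alt_eq_wjoin] at h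
  apply String.ext
  rw [h]
  simp
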